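-- pv_equiv track=rewrite | github.com/malcolmx-pro/wordlist-gen | wordlist-gen.py | wordlist_gen
-- ===== SOURCE A (Python) =====
-- import itertools
--
-- def wordlist_gen(characters, min_length, max_length):
--     wordlist = []
--     total_combinations = 0
--
--     for length in range(min_length, max_length + 1):
--         combinations = itertools.product(characters, repeat=length)
--         for combination in combinations:
--             word = ''.join(combination)
--             wordlist.append(word)
--             total_combinations += 1
--
--     return wordlist, total_combinations
-- ===== SOURCE B (Python) =====
-- def wordlist_gen(characters, min_length, max_length):
--     if max_length < min_length:
--         return [], 0
--     wordlist = []
--     prefixes = ['']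
--     for length in range(0, max_length + 1):
--         if length >= min_length:
--             wordlist += prefixes
--         if length < max_length:
--             prefixes = [p + c for p in prefixes for c in characters]
--     return wordlist, len(wordlist)
-- ===== Notes on version B (the rewrite author's own statement) =====
-- stated objective: alternative
-- what changed: B grows the wordlist incrementally: it keeps the current list of prefixes (starting from ['']) and extends every prefix by each character per length, instead of recomputing an independent itertools.product for each length; the count is len(wordlist) instead of a running counter.
import Mathlib
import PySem

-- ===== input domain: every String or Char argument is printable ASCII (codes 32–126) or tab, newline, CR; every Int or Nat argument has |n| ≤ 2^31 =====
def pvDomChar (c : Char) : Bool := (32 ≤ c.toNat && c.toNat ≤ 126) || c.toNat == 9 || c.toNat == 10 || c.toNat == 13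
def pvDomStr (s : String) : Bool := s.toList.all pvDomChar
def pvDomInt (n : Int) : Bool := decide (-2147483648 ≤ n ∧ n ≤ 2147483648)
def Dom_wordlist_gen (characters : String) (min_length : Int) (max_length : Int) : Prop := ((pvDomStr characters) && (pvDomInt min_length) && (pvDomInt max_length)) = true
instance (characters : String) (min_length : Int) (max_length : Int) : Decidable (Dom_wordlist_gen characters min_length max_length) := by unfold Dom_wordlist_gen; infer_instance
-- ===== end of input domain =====

-- B replaces the per-length itertools.product recomputation by incrementally extending a
-- running list of prefixes (objective: alternative decomposition, same output order).

-- ===== PORT A =====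
-- itertools.product(characters, repeat=n): all n-tuples in input order, rightmost position fastest.
def pyProduct (cs : List Char) : Nat → List (List Char)
  | 0 => [[]]
  | n + 1 => cs.flatMap (fun c => (pyProduct cs n).map (fun p => c :: p))

def wordlist_gen (characters : String) (min_length : Int) (max_length : Int) : List String × Int :=
  (PySem.List.pyRange min_length (max_length + 1) 1).foldl
    (fun st length =>
      (pyProduct characters.toList length.toNat).foldl
        (fun st2 comb => (st2.1 ++ [String.ofList comb], st2.2 + 1)) st)
    ([], 0)

-- ===== PORT B =====
def wordlist_gen_alt (characters : String) (min_length : Int) (max_length : Int) : List String × Int :=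
  if max_length < min_length then ([], 0)
  else
    let st := (PySem.List.pyRange 0 (max_length + 1) 1).foldl
      (fun (st : List String × List String) length =>
        let wl := if min_length ≤ length then st.1 ++ st.2 else st.1
        let pf := if length < max_length then
            st.2.flatMap (fun p => characters.toList.map (fun c => p.push c))
          else st.2
        (wl, pf))
      ([], [""])
    (st.1, (st.1.length : Int))

-- ===== PRECONDITION & SPEC =====
-- Pre_ excludes exactly the inputs where A raises: a negative length inside the range
-- (itertools.product with repeat < 0 raises ValueError).
def Pre_wordlist_gen (characters : String) (min_length : Int) (max_length : Int) : Prop :=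
  max_length < min_length ∨ 0 ≤ min_length
instance (characters : String) (min_length : Int) (max_length : Int) : Decidable (Pre_wordlist_gen characters min_length max_length) := by unfold Pre_wordlist_gen; infer_instance

def pvWitness_wordlist_gen : String × Int × Int := ("ab", 1, 2)

def Spec_wordlist_gen (characters : String) (min_length : Int) (max_length : Int) (out : List String × Int) : Prop := out = wordlist_gen_alt characters min_length max_length
instance (characters : String) (min_length : Int) (max_length : Int) (out : List String × Int) : Decidable (Spec_wordlist_gen characters min_length max_length out) := by unfold Spec_wordlist_gen; infer_instance

-- ===== CLAIM (what is proved, stated in full; the proofs are below) =====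
def Claim_equal_wordlist_gen : Prop := ∀ (characters : String) (min_length : Int) (max_length : Int), Dom_wordlist_gen characters min_length max_length → Pre_wordlist_gen characters min_length max_length → Spec_wordlist_gen characters min_length max_length (wordlist_gen characters min_length max_length)

-- ===== LEMMAS AND PROOFS =====

-- the words of length n, in product order
def wordsAt (cs : List Char) (n : Nat) : List String := (pyProduct cs n).map String.ofList

-- snoc characterization of pyProduct: extending every prefix on the right by each character
lemma map_eq_flatMap_singleton (cs : List Char) :
    List.map (fun c => [c]) cs = List.flatMap (fun c => [[c]]) cs := by
  induction cs with
  | nil => rfl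
  | cons a l ih => simp only [List.map_cons, List.flatMap_cons, ih]; rfl

lemma pyProduct_snoc (cs : List Char) (n : Nat) :
    (pyProduct cs n).flatMap (fun p => cs.map (fun c => p ++ [c])) = pyProduct cs (n + 1) := by
  induction n with
  | zero => simp [pyProduct, map_eq_flatMap_singleton]
  | succ n ih =>
    conv_lhs => rw [pyProduct]
    rw [List.flatMap_assoc]
    simp only [List.flatMap_map]
    conv_rhs => rw [pyProduct]
    rw [← ih]
    simp [Function.comp_def, List.map_flatMap, List.map_map]

lemma mk_push (l : List Char) (c : Char) : (String.ofList l).push c = String.ofList (l ++ [c]) := by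
  rw [String.push_eq_append, String.ofList_append]; rfl

lemma wordsAt_step (cs : List Char) (n : Nat) :
    (wordsAt cs n).flatMap (fun p => cs.map (fun c => p.push c)) = wordsAt cs (n + 1) := by
  unfold wordsAt
  rw [← pyProduct_snoc, List.flatMap_map, List.map_flatMap]
  simp [Function.comp_def, List.map_map, mk_push, String.ofList_append]

-- inner loop of A: appending all words of one length and counting them
lemma a_inner (xs : List (List Char)) : ∀ (wl : List String) (cnt : Int),
    xs.foldl (fun st2 comb => (st2.1 ++ [String.ofList comb], st2.2 + 1)) (wl, cnt)
      = (wl ++ xs.map String.ofList, cnt + xs.length) := by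
  induction xs with
  | nil => simp
  | cons x xs ih =>
    intro wl cnt
    simp only [List.foldl_cons, ih]
    simp only [Prod.mk.injEq]
    refine ⟨by simp, ?_⟩
    simp only [List.length_cons]
    push_cast
    ring

-- outer loop of A over any list of (nonnegative, via .toNat) lengths
lemma a_outer (cs : List Char) (L : List Int) : ∀ (wl : List String) (cnt : Int),
    L.foldl (fun st length =>
        (pyProduct cs length.toNat).foldl
          (fun st2 comb => (st2.1 ++ [String.ofList comb], st2.2 + 1)) st) (wl, cnt)
      = (wl ++ L.flatMap (fun n => wordsAt cs n.toNat),
         cnt + (L.flatMap (fun n => wordsAt cs n.toNat)).length) := by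
  induction L with
  | nil => simp
  | cons a L ih =>
    intro wl cnt
    simp only [List.foldl_cons, a_inner, ih, List.flatMap_cons]
    simp only [Prod.mk.injEq]
    refine ⟨by simp [wordsAt], ?_⟩
    simp only [wordsAt, List.length_append, List.length_map]
    push_cast
    ring

-- loop of B: invariant "prefixes = wordsAt of the current length"
lemma b_loop (cs : List Char) (mn mx : Int) : ∀ (k : Nat) (a : Int) (wl : List String),
    0 ≤ a → a + k ≤ mx + 1 →
    ((PySem.List.pyRange a (a + k) 1).foldl
      (fun (st : List String × List String) length =>
        let wl := if mn ≤ length then st.1 ++ st.2 else st.1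
        let pf := if length < mx then
            st.2.flatMap (fun p => cs.map (fun c => p.push c))
          else st.2
        (wl, pf))
      (wl, wordsAt cs a.toNat)).1
    = wl ++ (PySem.List.pyRange a (a + k) 1).flatMap
        (fun n => if mn ≤ n then wordsAt cs n.toNat else []) := by
  intro k
  induction k with
  | zero =>
    intro a wl _ _
    simp
  | succ k ih =>
    intro a wl ha hb
    rw [PySem.List.pyRange_one_cons (by omega : a < a + (k+1:Nat))]
    simp only [List.foldl_cons, List.flatMap_cons]
    have hrange : a + ((k+1:Nat) : Int) = (a + 1) + (k : Int) := by push_cast; ring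
    by_cases hlt : a < mx
    · have h1 : (a + 1).toNat = a.toNat + 1 := by omega
      rw [hrange]
      simp only [if_pos hlt]
      rw [show (wordsAt cs a.toNat).flatMap (fun p => cs.map (fun c => p.push c))
            = wordsAt cs (a+1).toNat by rw [wordsAt_step]; rw [h1]]
      by_cases hmn : mn ≤ a
      · simp only [if_pos hmn]
        rw [ih (a+1) (wl ++ wordsAt cs a.toNat) (by omega) (by omega)]
        simp
      · simp only [if_neg hmn]
        rw [ih (a+1) wl (by omega) (by omega)]
        simp
    · -- a = mx, so k = 0 and the remaining range is empty
      have hk : k = 0 := by omega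
      subst hk
      simp only [if_neg hlt]
      rw [hrange]
      rw [PySem.List.pyRange_one_eq_nil (by omega : a + 1 + (0:Nat) ≤ a + 1)]
      by_cases hmn : mn ≤ a
      · simp [hmn]
      · simp [hmn]

lemma flatMap_if_range (cs : List Char) (mn mx : Int) (h0 : 0 ≤ mn) (h1 : mn ≤ mx + 1) :
    (PySem.List.pyRange 0 (mx + 1) 1).flatMap
        (fun n => if mn ≤ n then wordsAt cs n.toNat else [])
      = (PySem.List.pyRange mn (mx + 1) 1).flatMap (fun n => wordsAt cs n.toNat) := by
  rw [PySem.List.pyRange_one_append 0 mn (mx + 1) h0 h1, List.flatMap_append]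
  have hlo : (PySem.List.pyRange 0 mn 1).flatMap
      (fun n => if mn ≤ n then wordsAt cs n.toNat else []) = [] := by
    apply List.flatMap_eq_nil_iff.mpr
    intro n hn
    rw [PySem.List.mem_pyRange_one] at hn
    simp [show ¬ mn ≤ n by omega]
  have hhi : (PySem.List.pyRange mn (mx + 1) 1).flatMap
      (fun n => if mn ≤ n then wordsAt cs n.toNat else [])
      = (PySem.List.pyRange mn (mx + 1) 1).flatMap (fun n => wordsAt cs n.toNat) := by
    unfold List.flatMap
    congr 1
    apply List.map_congr_left
    intro n hn
    rw [PySem.List.mem_pyRange_one] at hn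
    simp [hn.1]
  rw [hlo, hhi, List.nil_append]

-- ===== VERDICT (by name: the statement is the Claim_ definition above) =====
theorem wordlist_gen_spec : Claim_equal_wordlist_gen := by
  intro cs mn mx _ hpre
  unfold Spec_wordlist_gen wordlist_gen wordlist_gen_alt
  by_cases hle : mx < mn
  · rw [if_pos hle, PySem.List.pyRange_one_eq_nil (by omega : mx + 1 ≤ mn)]
    simp
  · have h0 : 0 ≤ mn := hpre.resolve_left hle
    rw [if_neg hle]
    rw [a_outer]
    have hM : ∃ k : Nat, (mx + 1) = 0 + (k : Int) := ⟨(mx + 1).toNat, by omega⟩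
    obtain ⟨k, hk⟩ := hM
    have hloop := b_loop cs.toList mn mx k 0 [] le_rfl (by omega)
    rw [← hk] at hloop
    have hpf0 : wordsAt cs.toList (0:Int).toNat = [""] := by
      simp [wordsAt, pyProduct]
    rw [hpf0] at hloop
    simp only [hloop, List.nil_append]
    rw [flatMap_if_range cs.toList mn mx h0 (by omega)]
    simp
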